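-- pv_equiv track=rewrite | github.com/haixiangyan/leetcode-python | Databricks Karat/doc2. Has Common.py | has_common
-- ===== SOURCE A (Python) =====
-- def has_common(edges, a, b):
--     graph = get_graph(edges)
--
--     a_parents = {a}
--     b_parents = {b}
--
--     get_parents(graph, a, a_parents)
--     get_parents(graph, b, b_parents)
--
--     for parent in a_parents:
--         if parent in b_parents:
--             return True
--
--     return False
--
-- def get_parents(graph, node, parents):
--     if node not in graph:
--         return
--
--     for parent in graph[node]:
--         parents.add(parent)
--
-- def get_graph(edges):
--     graph = {}
--
--     for edge in edges:
--         parent, child = edge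
--
--         if parent not in graph:
--             graph[parent] = set()
--         if child not in graph:
--             graph[child] = set()
--
--         graph[child].add(parent)
--
--     return graph
-- ===== SOURCE B (Python) =====
-- def has_common(edges, a, b):
--     # One filtering pass over the edges: collect immediate parents of a and b
--     # directly, seeded with the nodes themselves; no reverse graph is built.
--     a_parents = {a}
--     b_parents = {b}
--     for parent, child in edges:
--         if child == a:
--             a_parents.add(parent)
--         if child == b:
--             b_parents.add(parent)
--     return not a_parents.isdisjoint(b_parents)
-- ===== Notes on version B (the rewrite author's own statement) =====
-- stated objective: simpler
-- what changed: B replaces A's build-a-full-reverse-graph-dict-then-look-up-two-nodes structure by a single filtering pass that accumulates the two parent sets directly and tests them for disjointness.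
import Mathlib
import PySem

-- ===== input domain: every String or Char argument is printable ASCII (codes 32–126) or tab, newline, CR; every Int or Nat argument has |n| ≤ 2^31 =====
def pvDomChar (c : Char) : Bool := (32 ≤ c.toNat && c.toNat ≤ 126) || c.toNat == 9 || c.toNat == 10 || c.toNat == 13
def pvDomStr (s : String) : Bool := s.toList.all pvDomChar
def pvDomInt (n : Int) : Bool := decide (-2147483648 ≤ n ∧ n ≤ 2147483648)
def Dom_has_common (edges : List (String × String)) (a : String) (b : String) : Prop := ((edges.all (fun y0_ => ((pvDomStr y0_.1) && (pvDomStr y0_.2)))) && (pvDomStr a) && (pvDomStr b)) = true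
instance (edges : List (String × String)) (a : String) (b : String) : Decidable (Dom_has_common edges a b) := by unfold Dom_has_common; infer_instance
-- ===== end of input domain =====

-- B is simpler: one filtering pass collecting the two parent sets directly, instead of
-- building a full reverse-adjacency dict and then looking up two nodes in it.

-- ===== PORT A =====
def get_graph (edges : List (String × String)) : PySem.Dict String (PySem.Set String) :=
  edges.foldl (fun graph edge =>
    let parent := edge.1
    let child := edge.2
    let graph := if graph.contains parent then graph else graph.insert parent PySem.Set.empty
    let graph := if graph.contains child then graph else graph.insert child PySem.Set.empty
    -- graph[child].add(parent): child is present here, so modify with default ∅ is exact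
    graph.modify child PySem.Set.empty (fun s => PySem.Set.add s parent)) PySem.Dict.empty

def get_parents (graph : PySem.Dict String (PySem.Set String)) (node : String)
    (parents : PySem.Set String) : PySem.Set String :=
  match graph.get? node with
  | none => parents
  | some ps => ps.foldl PySem.Set.add parents

def has_common (edges : List (String × String)) (a : String) (b : String) : Bool :=
  let graph := get_graph edges
  let a_parents := get_parents graph a (PySem.Set.ofList [a])
  let b_parents := get_parents graph b (PySem.Set.ofList [b])
  -- 'for parent in a_parents: if parent in b_parents: return True' — order-independent
  a_parents.any (fun parent => PySem.Set.contains b_parents parent)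

-- ===== PORT B =====
def has_common_alt (edges : List (String × String)) (a : String) (b : String) : Bool :=
  let st := edges.foldl (fun (st : PySem.Set String × PySem.Set String) edge =>
    (if edge.2 == a then PySem.Set.add st.1 edge.1 else st.1,
     if edge.2 == b then PySem.Set.add st.2 edge.1 else st.2))
    (PySem.Set.ofList [a], PySem.Set.ofList [b])
  !(PySem.Set.isdisjoint st.1 st.2)

-- ===== PRECONDITION & SPEC =====
def Spec_has_common (edges : List (String × String)) (a : String) (b : String) (out : Bool) : Prop := out = has_common_alt edges a b
instance (edges : List (String × String)) (a : String) (b : String) (out : Bool) : Decidable (Spec_has_common edges a b out) := by unfold Spec_has_common; infer_instance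

-- ===== CLAIM (what is proved, stated in full; the proofs are below) =====
def Claim_equal_has_common : Prop := ∀ (edges : List (String × String)) (a : String) (b : String), Dom_has_common edges a b → Spec_has_common edges a b (has_common edges a b)

-- ===== LEMMAS AND PROOFS =====

-- one step of get_graph's loop, seen through getD with default ∅
theorem getD_graph_step (d : PySem.Dict String (PySem.Set String)) (p c x : String) :
    (let d1 := if d.contains p then d else d.insert p PySem.Set.empty
     let d2 := if d1.contains c then d1 else d1.insert c PySem.Set.empty
     (d2.modify c PySem.Set.empty (fun s => PySem.Set.add s p)).getD x PySem.Set.empty)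
    = if x = c then PySem.Set.add (d.getD c PySem.Set.empty) p else d.getD x PySem.Set.empty := by
  have key : ∀ (e : PySem.Dict String (PySem.Set String)) (k y : String),
      (if e.contains k then e else e.insert k PySem.Set.empty).getD y PySem.Set.empty
        = e.getD y PySem.Set.empty := by
    intro e k y
    by_cases h : e.contains k
    · simp [h]
    · rw [if_neg (by simp [h]), PySem.Dict.getD_insert]
      by_cases hy : y = k
      · subst hy
        rw [if_pos rfl]
        exact (PySem.Dict.getD_of_not_contains e _ (by simpa using h)).symm
      · rw [if_neg hy]
  simp only []
  rw [PySem.Dict.getD_modify]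
  simp only [key]

theorem mem_getD_get_graph (edges : List (String × String))
    (d : PySem.Dict String (PySem.Set String)) (c x : String) :
    x ∈ (edges.foldl (fun graph edge =>
      let parent := edge.1
      let child := edge.2
      let graph := if graph.contains parent then graph else graph.insert parent PySem.Set.empty
      let graph := if graph.contains child then graph else graph.insert child PySem.Set.empty
      graph.modify child PySem.Set.empty (fun s => PySem.Set.add s parent)) d).getD c PySem.Set.empty
    ↔ x ∈ d.getD c PySem.Set.empty ∨ (x, c) ∈ edges := by
  induction edges generalizing d with
  | nil => simp
  | cons e rest ih =>
    simp only [List.foldl_cons, ih]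
    rw [show (let graph := if d.contains e.1 then d else d.insert e.1 PySem.Set.empty
              let graph := if graph.contains e.2 then graph else graph.insert e.2 PySem.Set.empty
              graph.modify e.2 PySem.Set.empty fun s => PySem.Set.add s e.1).getD c PySem.Set.empty
        = if c = e.2 then PySem.Set.add (d.getD e.2 PySem.Set.empty) e.1 else d.getD c PySem.Set.empty
        from getD_graph_step d e.1 e.2 c]
    by_cases hc : c = e.2
    · subst hc
      simp [PySem.Set.mem_add, Prod.ext_iff]
      tauto
    · simp [hc, Prod.ext_iff]

theorem mem_foldl_add (ps seed : List String) (x : String) :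
    x ∈ ps.foldl PySem.Set.add seed ↔ x ∈ seed ∨ x ∈ ps := by
  induction ps generalizing seed with
  | nil => simp
  | cons y ys ih =>
    simp only [List.foldl_cons, ih, PySem.Set.mem_add, List.mem_cons]
    tauto

theorem mem_get_parents (graph : PySem.Dict String (PySem.Set String)) (c : String)
    (seed : PySem.Set String) (x : String) :
    x ∈ get_parents graph c seed ↔ x ∈ seed ∨ x ∈ graph.getD c PySem.Set.empty := by
  unfold get_parents
  cases h : graph.get? c with
  | none =>
    rw [PySem.Dict.getD_of_get?_eq_none graph PySem.Set.empty h]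
    simp [PySem.Set.empty]
  | some ps =>
    simp only [PySem.Dict.getD_of_get?_eq_some graph PySem.Set.empty h]
    exact mem_foldl_add ps seed x

-- B's loop: membership in the two accumulated parent sets
theorem mem_fold_alt (edges : List (String × String)) (a b : String)
    (ap bp : PySem.Set String) (x : String) :
    (x ∈ (edges.foldl (fun (st : PySem.Set String × PySem.Set String) edge =>
        (if edge.2 == a then PySem.Set.add st.1 edge.1 else st.1,
         if edge.2 == b then PySem.Set.add st.2 edge.1 else st.2)) (ap, bp)).1
      ↔ x ∈ ap ∨ (x, a) ∈ edges) ∧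
    (x ∈ (edges.foldl (fun (st : PySem.Set String × PySem.Set String) edge =>
        (if edge.2 == a then PySem.Set.add st.1 edge.1 else st.1,
         if edge.2 == b then PySem.Set.add st.2 edge.1 else st.2)) (ap, bp)).2
      ↔ x ∈ bp ∨ (x, b) ∈ edges) := by
  induction edges generalizing ap bp with
  | nil => simp
  | cons e rest ih =>
    simp only [List.foldl_cons]
    refine ⟨((ih _ _).1).trans ?_, ((ih _ _).2).trans ?_⟩ <;>
      · simp only [beq_iff_eq, List.mem_cons, Prod.ext_iff]
        split_ifs with h1
        · have h1' := h1.symm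
          simp only [PySem.Set.mem_add]
          tauto
        · constructor
          · rintro (hx | hx) <;> tauto
          · rintro (hx | ⟨hx1, hx2⟩ | hx) <;> tauto

theorem has_common_iff (edges : List (String × String)) (a b : String) :
    has_common edges a b = true ↔
      ∃ x, (x = a ∨ (x, a) ∈ edges) ∧ (x = b ∨ (x, b) ∈ edges) := by
  unfold has_common get_graph
  simp only [List.any_eq_true, PySem.Set.contains_iff]
  constructor
  · rintro ⟨x, hxa, hxb⟩
    rw [mem_get_parents] at hxa hxb
    rw [mem_getD_get_graph] at hxa hxb
    refine ⟨x, ?_, ?_⟩ <;> simp_all [PySem.Set.mem_ofList]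
  · rintro ⟨x, hxa, hxb⟩
    refine ⟨x, ?_, ?_⟩ <;> rw [mem_get_parents, mem_getD_get_graph] <;>
      simp [PySem.Set.mem_ofList] <;> tauto

theorem has_common_alt_iff (edges : List (String × String)) (a b : String) :
    has_common_alt edges a b = true ↔
      ∃ x, (x = a ∨ (x, a) ∈ edges) ∧ (x = b ∨ (x, b) ∈ edges) := by
  unfold has_common_alt
  simp only []
  rw [Bool.not_eq_true', ← Bool.not_eq_true, PySem.Set.isdisjoint_iff]
  push Not
  constructor
  · rintro ⟨x, hx1, hx2⟩
    rw [(mem_fold_alt _ a b _ _ x).1] at hx1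
    rw [(mem_fold_alt _ a b _ _ x).2] at hx2
    exact ⟨x, by simpa [PySem.Set.mem_ofList] using hx1,
             by simpa [PySem.Set.mem_ofList] using hx2⟩
  · rintro ⟨x, hx1, hx2⟩
    refine ⟨x, ?_, ?_⟩
    · rw [(mem_fold_alt _ a b _ _ x).1]
      simpa [PySem.Set.mem_ofList] using hx1
    · rw [(mem_fold_alt _ a b _ _ x).2]
      simpa [PySem.Set.mem_ofList] using hx2

-- ===== VERDICT (by name: the statement is the Claim_ definition above) =====
theorem has_common_spec : Claim_equal_has_common := by
  intro edges a b _
  unfold Spec_has_common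
  rw [Bool.eq_iff_iff, has_common_iff, has_common_alt_iff]
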